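-- pv_equiv track=rewrite | github.com/benwatson528/advent-of-code-15 | main/day25/let_it_snow.py | solve
-- ===== SOURCE A (Python) =====
-- def solve(end_row, end_col) -> int:
--     current_row = 1
--     current_col = 1
--     max_row = 1
--     current_val = 20151125
--     mult = 252533
--     remainder = 33554393
--     while (current_row, current_col) != (end_row, end_col):
--         if current_row - 1 == 0:
--             current_row = max_row + 1
--             max_row += 1
--             current_col = 1
--         else:
--             current_row -= 1
--             current_col += 1
--         current_val = (current_val * mult) % remainder
--     return current_val
-- ===== SOURCE B (Python) =====
-- def solve(end_row, end_col) -> int: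
--     k = (end_row + end_col - 2) * (end_row + end_col - 1) // 2 + (end_col - 1)
--     return 20151125 * pow(252533, k, 33554393) % 33554393
-- ===== Notes on version B (the rewrite author's own statement) =====
-- stated objective: faster
-- what changed: Replaced the step-by-step diagonal walk (one modular multiplication per cell) by the closed-form diagonal index k=(r+c-2)(r+c-1)/2+(c-1) and one modular exponentiation pow(252533,k,33554393).
import Mathlib
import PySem

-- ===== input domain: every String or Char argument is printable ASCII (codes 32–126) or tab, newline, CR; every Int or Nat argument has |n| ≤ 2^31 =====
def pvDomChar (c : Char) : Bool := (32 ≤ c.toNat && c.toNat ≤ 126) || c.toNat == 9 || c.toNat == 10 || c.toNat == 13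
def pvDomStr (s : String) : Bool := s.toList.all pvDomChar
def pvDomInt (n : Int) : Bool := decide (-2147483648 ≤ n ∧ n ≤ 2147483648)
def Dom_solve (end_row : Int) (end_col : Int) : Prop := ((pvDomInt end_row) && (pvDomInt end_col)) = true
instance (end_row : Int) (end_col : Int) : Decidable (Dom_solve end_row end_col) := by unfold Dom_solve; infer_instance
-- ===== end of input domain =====

-- B replaces A's cell-by-cell diagonal walk (one modular multiplication per visited cell) by the
-- closed-form diagonal index and one modular exponentiation; measured asymptotically faster.

-- ===== PORT A =====
-- A's while-loop, ported with a fuel parameter that only makes the recursion total; under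
-- Pre_solve the target cell is reached before the fuel runs out, so the fuel branch is never taken.
def loopA (er ec : Int) (fuel : Nat) (r c mr v : Int) : Int :=
  if r = er ∧ c = ec then v
  else
    match fuel with
    | 0 => v
    | f+1 =>
      if r - 1 = 0 then
        loopA er ec f (mr + 1) 1 (mr + 1) (PySem.Int.mod (v * 252533) 33554393)
      else
        loopA er ec f (r - 1) (c + 1) mr (PySem.Int.mod (v * 252533) 33554393)

def solve (end_row : Int) (end_col : Int) : Int :=
  loopA end_row end_col
    ((end_row.natAbs + end_col.natAbs) * (end_row.natAbs + end_col.natAbs)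
      + (end_row.natAbs + end_col.natAbs))
    1 1 1 20151125

-- ===== PORT B =====
-- Python's three-argument pow(b, e, m), ported as binary modular exponentiation; exact for the
-- nonnegative exponents Pre_solve admits.
def powmod (b : Int) (e : Nat) (m : Int) : Int :=
  if h : e = 0 then PySem.Int.mod 1 m
  else
    let r := powmod b (e / 2) m
    let r2 := PySem.Int.mod (r * r) m
    if e % 2 = 0 then r2 else PySem.Int.mod (r2 * b) m
decreasing_by exact Nat.div_lt_self (Nat.pos_of_ne_zero h) (by omega)

def solve_alt (end_row : Int) (end_col : Int) : Int :=
  PySem.Int.mod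
    (20151125 *
      powmod 252533
        (PySem.Int.floordiv ((end_row + end_col - 2) * (end_row + end_col - 1)) 2
          + (end_col - 1)).toNat
        33554393)
    33554393

-- ===== PRECONDITION & SPEC =====
-- Pre_solve: the grid coordinates A's walk can ever reach; for end_row < 1 or end_col < 1 the
-- Python while-loop never terminates (A returns on no such input), so nothing A returns on is excluded.
def Pre_solve (end_row : Int) (end_col : Int) : Prop := 1 ≤ end_row ∧ 1 ≤ end_col
instance (end_row : Int) (end_col : Int) : Decidable (Pre_solve end_row end_col) := by
  unfold Pre_solve; infer_instance

def pvWitness_solve : Int × Int := (3, 4)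

def Spec_solve (end_row : Int) (end_col : Int) (out : Int) : Prop := out = solve_alt end_row end_col
instance (end_row : Int) (end_col : Int) (out : Int) : Decidable (Spec_solve end_row end_col out) := by
  unfold Spec_solve; infer_instance

-- ===== CLAIM (what is proved, stated in full; the proofs are below) =====
def Claim_equal_solve : Prop := ∀ (end_row : Int) (end_col : Int), Dom_solve end_row end_col → Pre_solve end_row end_col → Spec_solve end_row end_col (solve end_row end_col)

-- ===== LEMMAS AND PROOFS =====

-- triangular numbers, recursively (no division, easier induction)
def tri : Nat → Nat
  | 0 => 0
  | n+1 => tri n + (n + 1)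

-- the 0-based diagonal index of cell (r, c), r, c ≥ 1
def idxN (r c : Int) : Nat := tri ((r - 1).toNat + (c - 1).toNat) + (c - 1).toNat

-- one step of A's walk, with max_row eliminated via the invariant mr = r + c - 1
def nextC : Int × Int → Int × Int :=
  fun p => if p.1 = 1 then (p.2 + 1, 1) else (p.1 - 1, p.2 + 1)

-- the cell A's walk occupies after n steps
def cellOf (n : Nat) : Int × Int := nextC^[n] (1, 1)

-- the value A's loop computes after n multiplications
def iterStep : Nat → Int → Int
  | 0, v => v
  | n+1, v => iterStep n (PySem.Int.mod (v * 252533) 33554393)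

theorem pmod_eq (x : Int) : PySem.Int.mod x 33554393 = x % 33554393 :=
  PySem.Int.mod_eq_emod_of_pos (by norm_num)

theorem tri_double (s : Nat) : 2 * tri s = s * (s + 1) := by
  induction s with
  | zero => rfl
  | succ n ih => simp only [tri]; nlinarith [ih]

theorem tri_le_sq (s : Nat) : tri s ≤ s * s := by
  induction s with
  | zero => simp [tri]
  | succ n ih => simp only [tri]; nlinarith [ih]

theorem tri_mono {s t : Nat} (h : s ≤ t) : tri s ≤ tri t := by
  induction t with
  | zero => have : s = 0 := by omega
            simp [this]
  | succ n ih =>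
    rcases Nat.lt_or_ge s (n + 1) with h' | h'
    · exact le_trans (ih (by omega)) (by simp [tri])
    · have : s = n + 1 := by omega
      simp [this]

theorem cellOf_succ (n : Nat) : cellOf (n + 1) = nextC (cellOf n) := by
  simp [cellOf, Function.iterate_succ_apply']

-- every state of the walk is a valid cell whose index is the step count
theorem valid_idx (n : Nat) :
    1 ≤ (cellOf n).1 ∧ 1 ≤ (cellOf n).2 ∧ idxN (cellOf n).1 (cellOf n).2 = n := by
  induction n with
  | zero => refine ⟨by decide, by decide, by decide⟩
  | succ n ih =>
    obtain ⟨hr, hc, hidx⟩ := ih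
    rw [cellOf_succ]
    rcases hcell : cellOf n with ⟨r, c⟩
    rw [hcell] at hr hc hidx
    simp only at hr hc hidx
    by_cases h1 : r = 1
    · subst h1
      have hn : nextC (1, c) = (c + 1, 1) := by simp [nextC]
      rw [hn]
      refine ⟨by omega, by norm_num, ?_⟩
      rw [← hidx]
      unfold idxN
      have h2 : (c + 1 - 1).toNat = (c - 1).toNat + 1 := by omega
      have h3 : ((1 : Int) - 1).toNat = 0 := by decide
      rw [h2, h3]
      simp only [tri, Nat.zero_add]
      generalize tri (c - 1).toNat = T
      omega
    · have hn : nextC (r, c) = (r - 1, c + 1) := by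
        simp only [nextC]; rw [if_neg h1]
      rw [hn]
      refine ⟨by omega, by omega, ?_⟩
      rw [← hidx]
      unfold idxN
      have harg : (r - 1 - 1).toNat + (c + 1 - 1).toNat = (r - 1).toNat + (c - 1).toNat := by omega
      rw [harg]
      generalize tri ((r - 1).toNat + (c - 1).toNat) = T
      omega

theorem tri_ge (s : Nat) : s ≤ tri s := by
  induction s with
  | zero => simp [tri]
  | succ n ih => simp only [tri]; omega

-- the walk reaches each valid cell at exactly its index
theorem cellOf_idx : ∀ (n : Nat) (r c : Int), 1 ≤ r → 1 ≤ c → idxN r c = n → cellOf n = (r, c) := by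
  intro n
  induction n using Nat.strong_induction_on with
  | _ n ih =>
    intro r c hr hc hidx
    by_cases hbase : r = 1 ∧ c = 1
    · obtain ⟨h1, h2⟩ := hbase
      subst h1; subst h2
      have : n = 0 := by rw [← hidx]; decide
      subst this; rfl
    · -- n ≥ 1: step back to the predecessor cell
      have hpos : 1 ≤ n := by
        rw [← hidx]
        unfold idxN
        by_cases hc2 : 2 ≤ c
        · have : 1 ≤ (c - 1).toNat := by omega
          omega
        · have hc1 : c = 1 := by omega
          have hr2 : 2 ≤ r := by
            rcases Nat.lt_or_ge r.toNat 2 with h | h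
            · exfalso; exact hbase ⟨by omega, hc1⟩
            · omega
          have h1 : 1 ≤ (r - 1).toNat + (c - 1).toNat := by omega
          have := tri_ge ((r - 1).toNat + (c - 1).toNat)
          omega
      obtain ⟨m, hm⟩ : ∃ m, n = m + 1 := ⟨n - 1, by omega⟩
      subst hm
      by_cases hc1 : c = 1
      · subst hc1
        have hr2 : 2 ≤ r := by
          rcases Nat.lt_or_ge r.toNat 2 with h | h
          · exfalso
            have : r = 1 := by omega
            exact hbase ⟨this, rfl⟩
          · omega
        have hprev : idxN 1 (r - 1) = m := by
          unfold idxN at hidx ⊢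
          have h0 : ((1 : Int) - 1).toNat = 0 := rfl
          rw [h0] at hidx ⊢
          simp only [Nat.add_zero, Nat.zero_add] at hidx ⊢
          have h2 : (r - 1).toNat = (r - 1 - 1).toNat + 1 := by omega
          rw [h2] at hidx
          simp only [tri] at hidx
          generalize tri (r - 1 - 1).toNat = T at *
          omega
        have hc : cellOf m = (1, r - 1) := ih m (by omega) 1 (r - 1) (by norm_num) (by omega) hprev
        rw [cellOf_succ, hc]
        simp only [nextC, ite_true]
        rw [Prod.mk.injEq]
        exact ⟨by omega, rfl⟩
      · have hc2 : 2 ≤ c := by omega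
        have hprev : idxN (r + 1) (c - 1) = m := by
          unfold idxN at hidx ⊢
          have harg : (r + 1 - 1).toNat + (c - 1 - 1).toNat = (r - 1).toNat + (c - 1).toNat := by
            omega
          rw [harg]
          generalize tri ((r - 1).toNat + (c - 1).toNat) = T at *
          omega
        have hc : cellOf m = (r + 1, c - 1) :=
          ih m (by omega) (r + 1) (c - 1) (by omega) (by omega) hprev
        rw [cellOf_succ, hc]
        simp only [nextC]
        rw [if_neg (show ¬(r + 1 : Int) = 1 by omega)]
        rw [Prod.mk.injEq]
        exact ⟨by omega, by omega⟩

-- A's loop, started at the cell of index i with enough fuel, performs exactly the remaining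
-- number of multiplications
theorem loop_sim (er ec : Int) (her : 1 ≤ er) (hec : 1 ≤ ec) :
    ∀ (n i fuel : Nat) (v : Int), i + n = idxN er ec → n ≤ fuel →
      loopA er ec fuel (cellOf i).1 (cellOf i).2 ((cellOf i).1 + (cellOf i).2 - 1) v
        = iterStep n v := by
  intro n
  induction n with
  | zero =>
    intro i fuel v hsum _
    have hi : i = idxN er ec := by omega
    subst hi
    have hcell : cellOf (idxN er ec) = (er, ec) := cellOf_idx _ er ec her hec rfl
    rw [hcell]
    unfold loopA
    simp [iterStep]
  | succ n ih =>
    intro i fuel v hsum hfuel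
    obtain ⟨hr, hc, hidx⟩ := valid_idx i
    have hne : ¬((cellOf i).1 = er ∧ (cellOf i).2 = ec) := by
      rintro ⟨h1, h2⟩
      rw [h1, h2] at hidx
      omega
    obtain ⟨f, hf⟩ : ∃ f, fuel = f + 1 := ⟨fuel - 1, by omega⟩
    subst hf
    rcases hcell : cellOf i with ⟨r, c⟩
    rw [hcell] at hr hc hne
    have hnext : cellOf (i + 1) = nextC (r, c) := by rw [cellOf_succ, hcell]
    unfold loopA
    rw [if_neg hne]
    simp only
    by_cases h1 : r - 1 = 0
    · have hr1 : r = 1 := by omega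
      rw [if_pos h1]
      have hcell1 : cellOf (i + 1) = (c + 1, 1) := by
        rw [hnext]; simp [nextC, hr1]
      have := ih (i + 1) f (PySem.Int.mod (v * 252533) 33554393) (by omega) (by omega)
      rw [hcell1] at this
      simp only at this
      rw [show (c + 1 : Int) + 1 - 1 = c + 1 by ring] at this
      rw [show r + c - 1 + 1 = c + 1 by omega]
      simp only [iterStep]
      exact this
    · rw [if_neg h1]
      have hcell1 : cellOf (i + 1) = (r - 1, c + 1) := by
        rw [hnext]; simp [nextC]; omega
      have := ih (i + 1) f (PySem.Int.mod (v * 252533) 33554393) (by omega) (by omega)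
      rw [hcell1] at this
      simp only at this
      rw [show (r - 1 : Int) + (c + 1) - 1 = r + c - 1 by ring] at this
      simp only [iterStep]
      exact this

theorem iterStep_eq (n : Nat) : ∀ (v : Int), 0 ≤ v → v < 33554393 →
    iterStep n v = (v * 252533 ^ n) % 33554393 := by
  induction n with
  | zero =>
    intro v h0 hlt
    simp only [iterStep, pow_zero, mul_one]
    exact (Int.emod_eq_of_lt h0 hlt).symm
  | succ n ih =>
    intro v h0 hlt
    simp only [iterStep, pmod_eq]
    rw [ih _ (Int.emod_nonneg _ (by norm_num)) (Int.emod_lt_of_pos _ (by norm_num))]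
    conv_rhs => rw [pow_succ']
    rw [← mul_assoc]
    conv_lhs => rw [Int.mul_emod]
    rw [Int.emod_emod_of_dvd _ (dvd_refl _), ← Int.mul_emod]

theorem powmod_eq : ∀ (e : Nat) (b : Int), powmod b e 33554393 = b ^ e % 33554393 := by
  intro e
  induction e using Nat.strong_induction_on with
  | _ e ih =>
    intro b
    by_cases h : e = 0
    · subst h; unfold powmod; simp
    · unfold powmod
      rw [dif_neg h]
      have hdiv : e / 2 < e := Nat.div_lt_self (Nat.pos_of_ne_zero h) (by omega)
      have hr := ih (e / 2) hdiv b
      simp only [hr, pmod_eq]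
      have hsq : b ^ (e / 2) % 33554393 * (b ^ (e / 2) % 33554393) % 33554393
          = b ^ (2 * (e / 2)) % 33554393 := by
        rw [← Int.mul_emod, two_mul, pow_add]
      by_cases h2 : e % 2 = 0
      · rw [if_pos h2, hsq, show 2 * (e / 2) = e by omega]
      · rw [if_neg h2, hsq, Int.mul_emod, Int.emod_emod_of_dvd _ (dvd_refl _), ← Int.mul_emod,
          ← pow_succ, show 2 * (e / 2) + 1 = e by omega]

-- B's closed-form index equals the walk's index
theorem index_eq (er ec : Int) (her : 1 ≤ er) (hec : 1 ≤ ec) :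
    (PySem.Int.floordiv ((er + ec - 2) * (er + ec - 1)) 2 + (ec - 1)).toNat = idxN er ec := by
  have hs1 : er + ec - 2 = (((er - 1).toNat + (ec - 1).toNat : Nat) : Int) := by
    push_cast; omega
  have hs2 : er + ec - 1 = (((er - 1).toNat + (ec - 1).toNat : Nat) : Int) + 1 := by
    push_cast; omega
  have htri : (er + ec - 2) * (er + ec - 1)
      = 2 * ((tri ((er - 1).toNat + (ec - 1).toNat) : Nat) : Int) := by
    rw [hs1, hs2]
    exact_mod_cast (tri_double ((er - 1).toNat + (ec - 1).toNat)).symm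
  rw [htri, PySem.Int.floordiv_eq_ediv_of_pos (by norm_num), Int.mul_ediv_cancel_left _ (by norm_num)]
  unfold idxN
  generalize tri ((er - 1).toNat + (ec - 1).toNat) = T
  omega

-- the fuel given to A's port covers the whole walk
theorem fuel_ge (er ec : Int) (her : 1 ≤ er) (hec : 1 ≤ ec) :
    idxN er ec ≤ (er.natAbs + ec.natAbs) * (er.natAbs + ec.natAbs) + (er.natAbs + ec.natAbs) := by
  unfold idxN
  have h1 : (er - 1).toNat + (ec - 1).toNat ≤ er.natAbs + ec.natAbs := by omega
  have h2 := tri_mono h1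
  have h3 := tri_le_sq (er.natAbs + ec.natAbs)
  omega

-- ===== VERDICT (by name: the statement is the Claim_ definition above) =====
theorem solve_spec : Claim_equal_solve := by
  intro er ec _ hpre
  obtain ⟨her, hec⟩ := hpre
  unfold Spec_solve solve solve_alt
  have hstart := loop_sim er ec her hec (idxN er ec) 0
    ((er.natAbs + ec.natAbs) * (er.natAbs + ec.natAbs) + (er.natAbs + ec.natAbs)) 20151125
    (by omega) (fuel_ge er ec her hec)
  have hcell0 : cellOf 0 = (1, 1) := rfl
  rw [hcell0] at hstart
  simp only at hstart
  rw [show (1 : Int) + 1 - 1 = 1 by ring] at hstart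
  rw [hstart, iterStep_eq _ 20151125 (by norm_num) (by norm_num)]
  rw [index_eq er ec her hec, powmod_eq, pmod_eq]
  rw [Int.mul_emod 20151125 (252533 ^ idxN er ec)]
  norm_num
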